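-- pv_equiv track=rewrite | github.com/Ch3m1stryK1ng/sourceagent | sourceagent/pipeline/channel_graph.py | _kind_hint_from_members
-- ===== SOURCE A (Python) =====
-- from typing import Any, Dict, Iterable, List, Optional, Set, Tuple
--
-- def _kind_hint_from_members(members: List[str]) -> str:
--     if not members:
--         return "payload_or_ctrl"
--     ctrl = 0
--     payload = 0
--     for name in members:
--         lower = str(name).lower()
--         if any(tok in lower for tok in ("head", "tail", "idx", "index", "flag", "ready", "done", "state")):
--             ctrl += 1
--         else:
--             payload += 1
--     if ctrl and not payload:
--         return "control"
--     if payload and not ctrl: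
--         return "payload"
--     return "payload_or_ctrl"
-- ===== SOURCE B (Python) =====
-- _TOKENS = ("head", "tail", "idx", "index", "flag", "ready", "done", "state")
--
-- def _is_ctrl(name):
--     lower = str(name).lower()
--     return any(tok in lower for tok in _TOKENS)
--
-- def _kind_hint_from_members(members):
--     it = iter(members)
--     try:
--         first = next(it)
--     except StopIteration:
--         return "payload_or_ctrl"
--     k = _is_ctrl(first)
--     for name in it:
--         if _is_ctrl(name) != k:
--             return "payload_or_ctrl"
--     return "control" if k else "payload"
-- ===== Notes on version B (the rewrite author's own statement) =====
-- stated objective: alternative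
-- what changed: Instead of counting control and payload members over the whole list and testing the two counters, B classifies only the first member and then short-circuit scans the rest, returning 'payload_or_ctrl' at the first member of a different kind (early exit on mixed lists).
import Mathlib
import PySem

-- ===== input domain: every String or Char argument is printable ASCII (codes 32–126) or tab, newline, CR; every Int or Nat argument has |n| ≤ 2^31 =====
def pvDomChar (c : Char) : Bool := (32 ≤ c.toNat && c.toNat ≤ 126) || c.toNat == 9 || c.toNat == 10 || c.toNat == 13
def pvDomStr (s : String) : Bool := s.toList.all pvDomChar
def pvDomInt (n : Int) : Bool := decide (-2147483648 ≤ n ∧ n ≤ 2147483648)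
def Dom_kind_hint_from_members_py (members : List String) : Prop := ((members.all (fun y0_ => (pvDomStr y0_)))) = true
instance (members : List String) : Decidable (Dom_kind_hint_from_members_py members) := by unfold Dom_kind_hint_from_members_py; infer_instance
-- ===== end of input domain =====

-- B classifies only the first member and short-circuit scans the rest for a member of a different
-- kind (early exit), instead of A's full two-counter pass (alternative; same worst-case cost).

-- shared helper: the token tuple and the per-name control test (identical inline expression in both Pythons)
def pvTokens : List String := ["head", "tail", "idx", "index", "flag", "ready", "done", "state"]
def pvIsCtrl (name : String) : Bool :=
  pvTokens.any (fun tok => PySem.Str.isIn tok (PySem.Str.lower name))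

-- ===== PORT A =====
def kind_hint_from_members_py (members : List String) : String :=
  if members = [] then "payload_or_ctrl"
  else
    let cp : Int × Int := members.foldl (fun (cp : Int × Int) name =>
      if pvIsCtrl name then (cp.1 + 1, cp.2) else (cp.1, cp.2 + 1)) (0, 0)
    if cp.1 ≠ 0 ∧ cp.2 = 0 then "control"
    else if cp.2 ≠ 0 ∧ cp.1 = 0 then "payload"
    else "payload_or_ctrl"

-- ===== PORT B =====
-- the early-exit scan of Source B's for-loop: true iff no member of the other kind was found
def pvSameKindScan (k : Bool) : List String → Bool
  | [] => true
  | n :: t => if pvIsCtrl n ≠ k then false else pvSameKindScan k t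

def kind_hint_from_members_py_alt (members : List String) : String :=
  match members with
  | [] => "payload_or_ctrl"
  | first :: rest =>
    let k := pvIsCtrl first
    if pvSameKindScan k rest then (if k then "control" else "payload")
    else "payload_or_ctrl"

-- ===== PRECONDITION & SPEC =====
def Spec_kind_hint_from_members_py (members : List String) (out : String) : Prop := out = kind_hint_from_members_py_alt members
instance (members : List String) (out : String) : Decidable (Spec_kind_hint_from_members_py members out) := by unfold Spec_kind_hint_from_members_py; infer_instance

-- ===== CLAIM (what is proved, stated in full; the proofs are below) =====
def Claim_equal_kind_hint_from_members_py : Prop := ∀ (members : List String), Dom_kind_hint_from_members_py members → Spec_kind_hint_from_members_py members (kind_hint_from_members_py members)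

-- ===== LEMMAS AND PROOFS =====

-- A's counter fold computes the two countP's
lemma pvFoldCount (l : List String) (c p : Int) :
    l.foldl (fun (cp : Int × Int) name =>
      if pvIsCtrl name then (cp.1 + 1, cp.2) else (cp.1, cp.2 + 1)) (c, p)
    = (c + (l.countP (fun x => pvIsCtrl x)), p + (l.countP (fun x => !pvIsCtrl x))) := by
  induction l generalizing c p with
  | nil => simp
  | cons hd tl ih =>
    simp only [List.foldl_cons, List.countP_cons]
    by_cases h : pvIsCtrl hd <;> simp [h, ih] <;> ring

-- B's scan succeeds iff every member has kind k
lemma pvScanAll (k : Bool) (l : List String) :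
    pvSameKindScan k l = l.all (fun x => pvIsCtrl x == k) := by
  induction l with
  | nil => rfl
  | cons hd tl ih =>
    simp only [pvSameKindScan, List.all_cons, ih]
    by_cases h : pvIsCtrl hd = k <;> simp [h]

-- ===== VERDICT (by name: the statement is the Claim_ definition above) =====
theorem kind_hint_from_members_py_spec : Claim_equal_kind_hint_from_members_py := by
  intro members _
  unfold Spec_kind_hint_from_members_py kind_hint_from_members_py kind_hint_from_members_py_alt
  cases members with
  | nil => rfl
  | cons first rest =>
    rw [if_neg (by simp)]
    simp only [pvFoldCount, pvScanAll]
    have hzero : ∀ (p : String → Bool),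
        rest.countP p = 0 ↔ ∀ x ∈ rest, p x = false := by
      intro p
      rw [List.countP_eq_zero]
      constructor
      · intro h x hx; simpa using h x hx
      · intro h x hx; simp [h x hx]
    cases hf : pvIsCtrl first with
    | true =>
      simp only [List.countP_cons, hf, List.all_eq_true, beq_iff_eq, Bool.not_true,
        if_true, Bool.false_eq_true, if_false]
      by_cases hA : rest.countP (fun x => !pvIsCtrl x) = 0
      · have hall : ∀ x ∈ rest, pvIsCtrl x = true := by
          intro x hx
          have := (hzero _).mp hA x hx
          simpa using this
        rw [if_pos hall, if_pos (by omega)]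
      · have hnall : ¬ ∀ x ∈ rest, pvIsCtrl x = true := by
          intro h
          exact hA ((hzero _).mpr (fun x hx => by simp [h x hx]))
        rw [if_neg hnall]
        rw [if_neg (by omega), if_neg (by omega)]
    | false =>
      simp only [List.countP_cons, hf, List.all_eq_true, beq_iff_eq, Bool.not_false,
        if_true, Bool.false_eq_true, if_false]
      by_cases hA : rest.countP (fun x => pvIsCtrl x) = 0
      · have hall : ∀ x ∈ rest, pvIsCtrl x = false := (hzero _).mp hA
        rw [if_pos hall]
        rw [if_neg (by omega), if_pos (by omega)]
      · have hnall : ¬ ∀ x ∈ rest, pvIsCtrl x = false := by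
          intro h
          exact hA ((hzero _).mpr h)
        rw [if_neg hnall]
        rw [if_neg (by omega), if_neg (by omega)]
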